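-- pv_equiv track=rewrite | github.com/Sairamg18814/shvayambhu | core/research/entity_extraction.py | _tokenize_and_clean
-- ===== SOURCE A (Python) =====
-- import string
-- from typing import Dict, List, Set, Tuple, Optional, Any
--
-- def _tokenize_and_clean(text: str) -> List[str]:
--     """Tokenize text and clean tokens."""
--     # Remove punctuation and split
--     translator = str.maketrans('', '', string.punctuation.replace('-', ''))
--     cleaned_text = text.translate(translator)
--
--     words = cleaned_text.split()
--
--     # Filter out very short or very long words
--     filtered_words = [
--         word for word in words
--         if 2 <= len(word) <= 30 and not word.isdigit()
--     ]
--
--     return filtered_words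
-- ===== SOURCE B (Python) =====
-- import string
--
-- def _tokenize_and_clean(text):
--     """One fused character-level scan: delete punctuation (except '-'), split on
--     whitespace and filter tokens by length/digit-ness while flushing the buffer."""
--     delete = set(string.punctuation) - {'-'}
--     out = []
--     buf = []
--     for ch in text:
--         if ch in delete:
--             continue
--         if ch.isspace():
--             if buf:
--                 tok = ''.join(buf)
--                 if 2 <= len(tok) <= 30 and not tok.isdigit():
--                     out.append(tok)
--                 buf = []
--         else:
--             buf.append(ch)
--     if buf:
--         tok = ''.join(buf)
--         if 2 <= len(tok) <= 30 and not tok.isdigit():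
--             out.append(tok)
--     return out
-- ===== Notes on version B (the rewrite author's own statement) =====
-- stated objective: alternative
-- what changed: Replaces A's three passes (translate to delete punctuation, str.split, comprehension filter) with a single character-level scan that skips punctuation, flushes a token buffer at whitespace and applies the length/digit filter at flush time.
import Mathlib
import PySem

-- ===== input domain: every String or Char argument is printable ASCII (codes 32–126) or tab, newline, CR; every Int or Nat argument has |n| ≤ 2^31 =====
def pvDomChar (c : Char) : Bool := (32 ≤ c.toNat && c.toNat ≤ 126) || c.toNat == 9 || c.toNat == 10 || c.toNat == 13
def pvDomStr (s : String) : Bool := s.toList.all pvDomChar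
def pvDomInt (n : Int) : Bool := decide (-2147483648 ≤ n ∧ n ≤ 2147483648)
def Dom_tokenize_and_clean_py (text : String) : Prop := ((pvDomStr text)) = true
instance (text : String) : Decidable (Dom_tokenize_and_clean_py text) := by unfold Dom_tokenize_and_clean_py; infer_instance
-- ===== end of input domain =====

-- B fuses A's three passes (translate, split, filter) into one character-level
-- scan with a token buffer; objective: alternative decomposition (one pass).

-- ===== PORT A =====
-- string.punctuation with '-' removed (the deletion table A builds)
def pvPunctNoHyphen : List Char := "!\"#$%&'()*+,./:;<=>?@[\\]^_`{|}~".toList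

def tokenize_and_clean_py (text : String) : List String :=
  -- cleaned_text = text.translate(delete punctuation-minus-hyphen)
  let cleaned : String := String.ofList (text.toList.filter (fun c => !pvPunctNoHyphen.contains c))
  -- words = cleaned_text.split()
  let words : List String := PySem.Str.split₀ cleaned
  -- list comprehension filter
  words.filter (fun w =>
    decide (2 ≤ PySem.Str.len w) && decide (PySem.Str.len w ≤ 30) && !PySem.Str.strIsdigit w)

-- ===== PORT B =====
-- token filter applied at flush time
def pvKeepTok (tok : List Char) : Bool :=
  decide (2 ≤ tok.length) && decide (tok.length ≤ 30) && !PySem.Chars.strIsdigit tok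

-- one step of B's scan: state = (emitted tokens, current buffer)
def pvAltStep (st : List String × List Char) (c : Char) : List String × List Char :=
  if pvPunctNoHyphen.contains c then st
  else if PySem.Chars.isspace c then
    if st.2.isEmpty then (st.1, [])
    else ((if pvKeepTok st.2 then st.1 ++ [String.ofList st.2] else st.1), [])
  else (st.1, st.2 ++ [c])

-- final flush of the buffer
def pvAltFinish (st : List String × List Char) : List String :=
  if st.2.isEmpty then st.1
  else if pvKeepTok st.2 then st.1 ++ [String.ofList st.2] else st.1

def tokenize_and_clean_py_alt (text : String) : List String :=
  pvAltFinish (text.toList.foldl pvAltStep ([], []))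

-- ===== PRECONDITION & SPEC =====
def Spec_tokenize_and_clean_py (text : String) (out : List String) : Prop := out = tokenize_and_clean_py_alt text
instance (text : String) (out : List String) : Decidable (Spec_tokenize_and_clean_py text out) := by unfold Spec_tokenize_and_clean_py; infer_instance

-- ===== CLAIM (what is proved, stated in full; the proofs are below) =====
def Claim_equal_tokenize_and_clean_py : Prop := ∀ (text : String), Dom_tokenize_and_clean_py text → Spec_tokenize_and_clean_py text (tokenize_and_clean_py text)

-- ===== LEMMAS AND PROOFS =====

-- one-step unfoldings of PySem.Chars.split₀.go
theorem pvGo_nil (cur : List Char) (acc : List (List Char)) :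
    PySem.Chars.split₀.go [] cur acc
      = if cur.isEmpty then acc.reverse else (cur.reverse :: acc).reverse := rfl

theorem pvGo_cons (c : Char) (cs cur : List Char) (acc : List (List Char)) :
    PySem.Chars.split₀.go (c :: cs) cur acc
      = if PySem.Chars.isspace c then
          (if cur.isEmpty then PySem.Chars.split₀.go cs [] acc
           else PySem.Chars.split₀.go cs [] (cur.reverse :: acc))
        else PySem.Chars.split₀.go cs (c :: cur) acc := rfl

-- deleted (punctuation) characters are skipped by the scan: folding over cs is
-- folding over cs with the deleted characters filtered out
theorem pvFoldl_filter_del (cs : List Char) (st : List String × List Char) :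
    cs.foldl pvAltStep st
      = (cs.filter (fun c => !pvPunctNoHyphen.contains c)).foldl pvAltStep st := by
  induction cs generalizing st with
  | nil => rfl
  | cons c cs ih =>
    by_cases h : c ∈ pvPunctNoHyphen
    · simp [List.filter, h, pvAltStep, ih]
    · simp [List.filter, h, ih]

-- split₀.go's accumulator prepends (reversed)
theorem pvGo_acc (cs : List Char) (cur : List Char) (acc : List (List Char)) :
    PySem.Chars.split₀.go cs cur acc = acc.reverse ++ PySem.Chars.split₀.go cs cur [] := by
  induction cs generalizing cur acc with
  | nil => by_cases h : cur.isEmpty <;> simp [pvGo_nil, h]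
  | cons c cs ih =>
    rw [pvGo_cons, pvGo_cons]
    by_cases hs : PySem.Chars.isspace c = true
    · by_cases h : cur.isEmpty
      · simp only [hs, if_true, h]; exact ih [] acc
      · simp only [hs, if_true, h]
        rw [ih [] (cur.reverse :: acc), ih [] [cur.reverse]]
        simp
    · simp only [hs]; exact ih (c :: cur) acc

-- the fused scan over punctuation-free characters computes the filtered tokens
-- of split₀.go run on the same characters with the same (reversed) buffer
theorem pvScan_eq_go (cs : List Char) (out : List String) (buf : List Char)
    (hcs : ∀ c ∈ cs, pvPunctNoHyphen.contains c = false) :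
    pvAltFinish (cs.foldl pvAltStep (out, buf))
      = out ++ ((PySem.Chars.split₀.go cs buf.reverse []).filter pvKeepTok).map String.ofList := by
  induction cs generalizing out buf with
  | nil =>
    by_cases hb : buf = []
    · subst hb; simp [pvAltFinish, pvGo_nil]
    · have h : buf.isEmpty = false := by simp [hb]
      simp only [List.foldl_nil, pvAltFinish, pvGo_nil]
      simp only [h, Bool.false_eq_true, if_false, List.isEmpty_reverse, List.reverse_reverse,
        List.reverse_nil]
      by_cases hk : pvKeepTok buf = true <;> simp [hk]
  | cons c cs ih =>
    have hc : pvPunctNoHyphen.contains c = false := hcs c (by simp)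
    have hcs' : ∀ x ∈ cs, pvPunctNoHyphen.contains x = false :=
      fun x hx => hcs x (by simp [hx])
    rw [pvGo_cons]
    by_cases hs : PySem.Chars.isspace c = true
    · by_cases hb : buf = []
      · subst hb
        simp only [List.foldl_cons, pvAltStep, hc, Bool.false_eq_true, if_false, hs, if_true,
          List.isEmpty_nil, List.reverse_nil]
        exact ih out [] hcs'
      · have h : buf.isEmpty = false := by simp [hb]
        simp only [List.foldl_cons, pvAltStep, hc, Bool.false_eq_true, if_false, hs, if_true, h,
          List.isEmpty_reverse, List.reverse_reverse]
        rw [ih _ [] hcs', pvGo_acc cs [] [buf]]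
        by_cases hk : pvKeepTok buf = true <;> simp [hk]
    · simp only [List.foldl_cons, pvAltStep, hc, Bool.false_eq_true, if_false, hs]
      have := ih out (buf ++ [c]) hcs'
      simpa using this

-- ===== VERDICT (by name: the statement is the Claim_ definition above) =====
theorem tokenize_and_clean_py_spec : Claim_equal_tokenize_and_clean_py := by
  intro text _
  unfold Spec_tokenize_and_clean_py tokenize_and_clean_py tokenize_and_clean_py_alt
  rw [pvFoldl_filter_del,
    pvScan_eq_go _ [] [] (by intro c hc; simpa using (List.of_mem_filter hc))]
  simp only [List.nil_append, PySem.Str.split₀, String.toList_ofList, List.reverse_nil]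
  rw [PySem.Chars.split₀, List.filter_map]
  congr 1
  apply List.filter_congr
  intro tok _
  simp [Function.comp, pvKeepTok, PySem.Str.len, PySem.Str.strIsdigit]
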